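-- pv_equiv track=rewrite | github.com/Cosmic-ThunderBoT/Data-Structures-Algorithm | Vertex with Maximum Out-Degree.py | maxOutDegVerList
-- ===== SOURCE A (Python) =====
-- def maxOutDegVerList(adjList):
--     max_deg = -1
--     vertex = -1
--
--     for i in range(len(adjList)):
--         deg = 0
--         for j in range(len(adjList[i])):
--             if adjList[i][j][0] != 0 or adjList[i][j][1] != 0:
--                 deg += 1
--
--         if deg > max_deg:
--             max_deg = deg
--             vertex = i
--
--     return vertex, max_deg
-- ===== SOURCE B (Python) =====
-- def maxOutDegVerList(adjList):
--     # Two-pass version: build the full degree table, then take max + first index.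
--     degs = [sum(1 for u, v in row if u != 0 or v != 0) for row in adjList]
--     if not degs:
--         return -1, -1
--     best = max(degs)
--     return degs.index(best), best
-- ===== Notes on version B (the rewrite author's own statement) =====
-- stated objective: simpler
-- what changed: Replaces the interleaved count-and-track-maximum loop by a degree-table comprehension followed by builtin max and a first-occurrence index lookup.
import Mathlib
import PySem

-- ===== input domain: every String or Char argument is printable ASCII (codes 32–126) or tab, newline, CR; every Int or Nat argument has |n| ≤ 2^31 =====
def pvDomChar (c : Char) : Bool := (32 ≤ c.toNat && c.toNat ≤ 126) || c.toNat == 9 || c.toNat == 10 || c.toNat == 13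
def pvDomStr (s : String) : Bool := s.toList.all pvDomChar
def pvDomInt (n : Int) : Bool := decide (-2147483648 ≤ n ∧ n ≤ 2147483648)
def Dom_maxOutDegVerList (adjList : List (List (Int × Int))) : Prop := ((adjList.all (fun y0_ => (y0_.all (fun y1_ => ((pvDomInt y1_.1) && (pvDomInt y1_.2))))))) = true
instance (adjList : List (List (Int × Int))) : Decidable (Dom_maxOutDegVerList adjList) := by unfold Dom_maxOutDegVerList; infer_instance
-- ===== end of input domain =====

-- B replaces A's interleaved count-and-track-max loop by a degree table, then builtin max and a first-occurrence index lookup (objective: simpler).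


-- ===== PORT A =====
-- inner loop of A: deg = 0; for j …: if adjList[i][j][0] != 0 or adjList[i][j][1] != 0: deg += 1
def degA (row : List (Int × Int)) : Int :=
  row.foldl (fun deg e => if e.1 ≠ 0 ∨ e.2 ≠ 0 then deg + 1 else deg) 0

-- outer loop of A, carrying the running index i and the state (max_deg, vertex)
def loopA : List (List (Int × Int)) → Int → Int → Int → Int × Int
  | [], _, maxDeg, vertex => (vertex, maxDeg)
  | row :: rest, i, maxDeg, vertex =>
      let deg := degA row
      if deg > maxDeg then loopA rest (i + 1) deg i else loopA rest (i + 1) maxDeg vertex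

def maxOutDegVerList (adjList : List (List (Int × Int))) : Int × Int :=
  loopA adjList 0 (-1) (-1)

-- ===== PORT B =====
-- sum(1 for u, v in row if u != 0 or v != 0)
def degB (row : List (Int × Int)) : Int :=
  ((row.filter (fun e => e.1 ≠ 0 ∨ e.2 ≠ 0)).length : Int)

def maxOutDegVerList_alt (adjList : List (List (Int × Int))) : Int × Int :=
  let degs := adjList.map degB
  match degs with
  | [] => (-1, -1)                                       -- if not degs: return -1, -1
  | d0 :: rest =>
      let best := rest.foldl max d0                      -- max(degs), the running-max loop
      (((PySem.List.index? degs best).getD 0 : Int), best)  -- degs.index(best); the getD default is unreachable (best ∈ degs)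

-- ===== PRECONDITION & SPEC =====
def Spec_maxOutDegVerList (adjList : List (List (Int × Int))) (out : Int × Int) : Prop := out = maxOutDegVerList_alt adjList
instance (adjList : List (List (Int × Int))) (out : Int × Int) : Decidable (Spec_maxOutDegVerList adjList out) := by unfold Spec_maxOutDegVerList; infer_instance

-- ===== CLAIM (what is proved, stated in full; the proofs are below) =====
def Claim_equal_maxOutDegVerList : Prop := ∀ (adjList : List (List (Int × Int))), Dom_maxOutDegVerList adjList → Spec_maxOutDegVerList adjList (maxOutDegVerList adjList)

-- ===== LEMMAS AND PROOFS =====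

theorem degA_aux (row : List (Int × Int)) (d : Int) :
    row.foldl (fun deg e => if e.1 ≠ 0 ∨ e.2 ≠ 0 then deg + 1 else deg) d
      = d + ((row.filter (fun e => e.1 ≠ 0 ∨ e.2 ≠ 0)).length : Int) := by
  induction row generalizing d with
  | nil => simp
  | cons e t ih =>
      by_cases h : e.1 ≠ 0 ∨ e.2 ≠ 0
      · simp [List.foldl_cons, h, ih]; ring
      · simp [List.foldl_cons, h, ih]

theorem degA_eq_degB (row : List (Int × Int)) : degA row = degB row := by
  simp [degA, degB, degA_aux]

theorem degB_nonneg (row : List (Int × Int))  : 0 ≤ degB row := by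
  simp [degB]

-- degree-level copy of A's outer loop
def loopD : List Int → Int → Int → Int → Int × Int
  | [], _, maxDeg, vertex => (vertex, maxDeg)
  | d :: rest, i, maxDeg, vertex =>
      if d > maxDeg then loopD rest (i + 1) d i else loopD rest (i + 1) maxDeg vertex

theorem loopA_eq_loopD (rows : List (List (Int × Int))) (i m v : Int) :
    loopA rows i m v = loopD (rows.map degB) i m v := by
  induction rows generalizing i m v with
  | nil => rfl
  | cons row rest ih => simp [loopA, loopD, degA_eq_degB, ih]

theorem foldl_max_mem_cons (a : Int) (l : List Int) : l.foldl max a ∈ a :: l := by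
  have h := PySem.List.max?_id_cons a l
  exact PySem.List.max?_mem h

-- closed form of A's loop: if some element beats m, the result is (start index + first index
-- of the overall running maximum, that maximum); otherwise the state is returned unchanged.
theorem loopD_spec (ds : List Int) (i m v : Int) :
    loopD ds i m v =
      if m < ds.foldl max m then
        (i + ((PySem.List.index? ds (ds.foldl max m)).getD 0 : Int), ds.foldl max m)
      else (v, m) := by
  induction ds generalizing i m v with
  | nil => simp [loopD]
  | cons d rest ih =>
      have hle : ∀ (a : Int) (l : List Int), a ≤ l.foldl max a :=
        fun a l => (PySem.List.le_foldl_max l a).1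
      by_cases h : d > m
      · have hmax : max m d = d := by omega
        simp only [loopD, if_pos h, List.foldl_cons, hmax, ih]
        by_cases h2 : d < rest.foldl max d
        · have hm : m < rest.foldl max d := lt_trans h h2
          have hne : d ≠ rest.foldl max d := ne_of_lt h2
          have hmem : rest.foldl max d ∈ rest := by
            rcases List.mem_cons.mp (foldl_max_mem_cons d rest) with h3 | h3
            · exact absurd h3.symm hne
            · exact h3
          obtain ⟨k, hk⟩ := Option.isSome_iff_exists.mp
            ((PySem.List.index?_isSome_iff rest (rest.foldl max d)).mpr hmem)
          rw [if_pos h2, if_pos hm, PySem.List.index?_cons_of_ne rest hne, hk]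
          simp only [Option.map_some, Option.getD_some]
          congr 1
          push_cast; ring
        · have heq : rest.foldl max d = d := le_antisymm (by omega) (hle d rest)
          rw [if_neg h2, heq, if_pos h, PySem.List.index?_cons_self]
          simp
      · have hmax : max m d = m := by omega
        simp only [loopD, if_neg h, List.foldl_cons, hmax, ih]
        by_cases h2 : m < rest.foldl max m
        · have hne : d ≠ rest.foldl max m := by omega
          have hmem : rest.foldl max m ∈ rest := by
            rcases List.mem_cons.mp (foldl_max_mem_cons m rest) with h3 | h3
            · omega
            · exact h3
          obtain ⟨k, hk⟩ := Option.isSome_iff_exists.mp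
            ((PySem.List.index?_isSome_iff rest (rest.foldl max m)).mpr hmem)
          rw [if_pos h2, if_pos h2, PySem.List.index?_cons_of_ne rest hne, hk]
          simp only [Option.map_some, Option.getD_some]
          congr 1
          push_cast; ring
        · rw [if_neg h2, if_neg h2]

-- ===== VERDICT (by name: the statement is the Claim_ definition above) =====
theorem maxOutDegVerList_spec : Claim_equal_maxOutDegVerList := by
  intro adjList _
  show maxOutDegVerList adjList = maxOutDegVerList_alt adjList
  unfold maxOutDegVerList maxOutDegVerList_alt
  rw [loopA_eq_loopD]
  cases hd : adjList.map degB with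
  | nil => simp [loopD]
  | cons d0 rest =>
      have hd0 : 0 ≤ d0 := by
        cases adjList with
        | nil => simp at hd
        | cons r t =>
            have h1 : degB r = d0 := by simpa using congrArg (fun l => l.headD 0) hd
            simpa [h1] using degB_nonneg r
      have hle := (PySem.List.le_foldl_max rest d0).1
      have hmax : (d0 :: rest).foldl max (-1) = rest.foldl max d0 := by
        have : max (-1 : Int) d0 = d0 := by omega
        simp [List.foldl_cons, this]
      have hlt : (-1 : Int) < (d0 :: rest).foldl max (-1) := by
        rw [hmax]; omega
      rw [loopD_spec, if_pos hlt, hmax]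
      simp
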